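-- pv_equiv track=rewrite | github.com/lzy37ld/why_attack | add_reward_for_harmbench.py | attack_collate_fn
-- ===== SOURCE A (Python) =====
-- def attack_collate_fn(batch):
--     collated_batch = {}
--     for item in batch:
--         for key, value in item.items():
--             if key in collated_batch:
--                 collated_batch[key].append(value)
--             else:
--                 collated_batch[key] = [value]
--     return collated_batch
-- ===== SOURCE B (Python) =====
-- def attack_collate_fn(batch):
--     keys = dict.fromkeys(k for item in batch for k in item)
--     return {k: [v for item in batch for k2, v in item.items() if k2 == k] for k in keys}
-- ===== Notes on version B (the rewrite author's own statement) =====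
-- stated objective: alternative
-- what changed: Reverses the loop nesting: first collects the ordered union of keys, then builds each output list by scanning the whole batch per key, instead of A's single grouping pass that mutates a dict entry by entry.
import Mathlib
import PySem

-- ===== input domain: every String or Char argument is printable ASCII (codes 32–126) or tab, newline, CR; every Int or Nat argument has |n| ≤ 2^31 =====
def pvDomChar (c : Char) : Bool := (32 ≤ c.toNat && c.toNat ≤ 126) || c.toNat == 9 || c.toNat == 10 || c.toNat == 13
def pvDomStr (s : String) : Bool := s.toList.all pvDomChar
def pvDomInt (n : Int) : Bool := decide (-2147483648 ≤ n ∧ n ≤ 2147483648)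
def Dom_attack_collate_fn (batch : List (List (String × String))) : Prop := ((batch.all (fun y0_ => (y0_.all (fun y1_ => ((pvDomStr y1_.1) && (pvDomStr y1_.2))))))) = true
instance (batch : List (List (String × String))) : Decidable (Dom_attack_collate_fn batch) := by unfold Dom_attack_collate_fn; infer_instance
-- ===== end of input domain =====

-- B reverses the loop nesting (ordered key-union first, then one batch scan per key) instead of A's single mutating grouping pass; alternative decomposition, same results.

-- ===== PORT A =====
def attack_collate_fn (batch : List (List (String × String))) : List (String × List String) :=
  (batch.foldl (fun d item =>
      item.foldl (fun d p =>
        if d.contains p.1 then d.modify p.1 ([] : List String) (fun xs => xs ++ [p.2])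
        else d.insert p.1 [p.2]) d)
    (PySem.Dict.empty : PySem.Dict String (List String))).items

-- ===== PORT B =====
def attack_collate_fn_alt (batch : List (List (String × String))) : List (String × List String) :=
  let keys := PySem.List.dedup (batch.flatMap (fun item => item.map Prod.fst))
  keys.map (fun k => (k, batch.flatMap (fun item => (item.filter (fun p => p.1 == k)).map Prod.snd)))

-- ===== PRECONDITION & SPEC =====
def Spec_attack_collate_fn (batch : List (List (String × String))) (out : List (String × List String)) : Prop := out = attack_collate_fn_alt batch
instance (batch : List (List (String × String))) (out : List (String × List String)) : Decidable (Spec_attack_collate_fn batch out) := by unfold Spec_attack_collate_fn; infer_instance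

-- ===== CLAIM (what is proved, stated in full; the proofs are below) =====
def Claim_equal_attack_collate_fn : Prop := ∀ (batch : List (List (String × String))), Dom_attack_collate_fn batch → Spec_attack_collate_fn batch (attack_collate_fn batch)

-- ===== LEMMAS AND PROOFS =====

-- A's branch is exactly Dict.modify with default []
theorem stepA_eq_modify (d : PySem.Dict String (List String)) (p : String × String) :
    (if d.contains p.1 then d.modify p.1 ([] : List String) (fun xs => xs ++ [p.2])
     else d.insert p.1 [p.2]) = d.modify p.1 ([] : List String) (fun xs => xs ++ [p.2]) := by
  by_cases h : d.contains p.1 = true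
  · simp [h]
  · have hg : d.getD p.1 ([] : List String) = [] :=
      PySem.Dict.getD_of_not_contains d ([] : List String) (by simpa using h)
    simp [h, PySem.Dict.modify, hg]

theorem nested_foldl {α β : Type} (g : β → α → β) (batch : List (List α)) (d : β) :
    batch.foldl (fun d item => item.foldl g d) d = (batch.flatMap id).foldl g d := by
  induction batch generalizing d with
  | nil => rfl
  | cons h t ih => simp [List.flatMap_cons, List.foldl_append, ih]

-- ===== VERDICT (by name: the statement is the Claim_ definition above) =====
theorem attack_collate_fn_spec : Claim_equal_attack_collate_fn := by
  intro batch _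
  unfold Spec_attack_collate_fn attack_collate_fn attack_collate_fn_alt
  have hstep : (fun (d : PySem.Dict String (List String)) (p : String × String) =>
      if d.contains p.1 then d.modify p.1 ([] : List String) (fun xs => xs ++ [p.2])
      else d.insert p.1 [p.2]) =
      (fun d p => d.modify p.1 ([] : List String) (fun xs => xs ++ [p.2])) := by
    funext d p; exact stepA_eq_modify d p
  rw [hstep, nested_foldl]
  set pairs := batch.flatMap id with hpairs
  have hnd : ((pairs.foldl (fun d p => d.modify p.1 ([] : List String) (fun xs => xs ++ [p.2]))
      PySem.Dict.empty).keys).Nodup := by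
    exact PySem.Dict.nodup_keys_foldl_modify_key pairs Prod.fst ([] : List String)
      (fun _ p => (fun xs => xs ++ [p.2])) PySem.Dict.empty (by simp)
  rw [PySem.Dict.items_eq_map_keys _ hnd ([] : List String)]
  rw [PySem.Dict.keys_foldl_modify_key]
  have hkeys : PySem.Set.update (PySem.Dict.empty : PySem.Dict String (List String)).keys
      (pairs.map Prod.fst) = PySem.List.dedup (batch.flatMap (fun item => item.map Prod.fst)) := by
    simp [PySem.Set.update, PySem.List.dedup_eq_ofList, PySem.Set.ofList_eq_foldl, hpairs,
      List.flatMap_def]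
  rw [hkeys]
  apply List.map_congr_left
  intro k _
  refine Prod.ext rfl ?_
  simp only [PySem.Dict.getD_foldl_modify_append, PySem.Dict.getD_empty, List.nil_append]
  simp only [hpairs, List.filter_flatMap, List.map_flatMap, id]
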